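-- pv_equiv track=rewrite | github.com/utilmeta/utilmeta-py | utilmeta/utils/functional/data.py | order_list
-- ===== SOURCE A (Python) =====
-- def order_list(data: list, orders: list, by: str, join_rest: bool = False) -> list:
--     result = []
--     if len(data) <= 1 or not orders:
--         return data
--     for i in orders:
--         for d in data:
--             d: dict
--             if str(d.get(by)) == str(i):
--                 result.append(d)
--                 data.remove(d)
--                 break
--     if join_rest:
--         result += data  # if there is remaining data left, join the result
--     return result
-- ===== SOURCE B (Python) =====
-- def order_list(data: list, orders: list, by: str, join_rest: bool = False) -> list:
--     if len(data) <= 1 or not orders: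
--         return data
--     # index dicts by str(by-value) into FIFO buckets: one pass over data,
--     # one pass over orders, optional one pass for the rest -> O(n + m)
--     buckets = {}
--     for d in data:
--         buckets.setdefault(str(d.get(by)), []).append(d)
--     pos = {}  # per key: how many bucket entries were already consumed
--     result = []
--     for i in orders:
--         k = str(i)
--         q = buckets.get(k)
--         if q is not None:
--             p = pos.get(k, 0)
--             if p < len(q):
--                 result.append(q[p])
--                 pos[k] = p + 1
--     if join_rest:
--         skip = dict(pos)
--         for d in data:
--             k = str(d.get(by))
--             n = skip.get(k, 0)
--             if n:
--                 skip[k] = n - 1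
--             else:
--                 result.append(d)
--     return result
-- ===== Notes on version B (the rewrite author's own statement) =====
-- stated objective: faster
-- what changed: Replaces the per-order linear scan with data.remove by a one-pass index of the dicts into per-key FIFO buckets plus consumption counters, so each order entry is served in O(1) and the rest is collected in one final pass.
import Mathlib
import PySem

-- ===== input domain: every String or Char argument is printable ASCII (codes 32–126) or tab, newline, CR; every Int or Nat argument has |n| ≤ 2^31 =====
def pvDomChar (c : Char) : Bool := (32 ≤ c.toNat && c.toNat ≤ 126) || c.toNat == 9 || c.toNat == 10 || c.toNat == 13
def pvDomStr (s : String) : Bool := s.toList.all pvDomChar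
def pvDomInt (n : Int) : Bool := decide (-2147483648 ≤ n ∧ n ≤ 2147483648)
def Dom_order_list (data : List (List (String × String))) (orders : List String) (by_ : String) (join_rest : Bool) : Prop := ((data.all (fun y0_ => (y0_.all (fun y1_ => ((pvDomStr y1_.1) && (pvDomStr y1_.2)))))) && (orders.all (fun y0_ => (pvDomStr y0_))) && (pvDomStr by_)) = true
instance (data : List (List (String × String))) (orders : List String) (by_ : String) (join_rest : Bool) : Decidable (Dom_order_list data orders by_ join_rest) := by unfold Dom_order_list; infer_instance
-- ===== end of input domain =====

-- B replaces A's per-order scan-and-remove over `data` by per-key FIFO buckets with consumption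
-- counters (one pass to index, O(1) per order entry, one pass for the rest). Equivalence is about
-- the RETURN value: Python A mutates its `data` argument in place (list.remove), B does not.

-- str(d.get(by)): first-match association-list lookup; missing key prints as "None"
def pvKey (by_ : String) (d : List (String × String)) : String :=
  match (d.find? (fun p => p.1 == by_)).map (·.2) with
  | some v => v
  | none => "None"

-- ===== PORT A =====
-- inner `for d in data: if str(d.get(by)) == str(i): … break` — find the first match
def aScan (by_ i : String) : List (List (String × String)) → Option (List (String × String))
  | [] => none
  | d :: rest => if pvKey by_ d == i then some d else aScan by_ i rest

def order_list (data : List (List (String × String))) (orders : List String) (by_ : String) (join_rest : Bool) : List (List (String × String)) :=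
  if data.length ≤ 1 ∨ orders = [] then data
  else
    -- for i in orders: find first match, append to result, data.remove(d)
    let st := orders.foldl
      (fun (st : List (List (String × String)) × List (List (String × String))) i =>
        match aScan by_ i st.2 with
        | some d => (st.1 ++ [d], (PySem.List.remove? st.2 d).getD st.2)  -- d ∈ st.2, remove? never none
        | none => st)
      ([], data)
    if join_rest then st.1 ++ st.2 else st.1

-- ===== PORT B =====
def order_list_alt (data : List (List (String × String))) (orders : List String) (by_ : String) (join_rest : Bool) : List (List (String × String)) :=
  if data.length ≤ 1 ∨ orders = [] then data
  else
    -- buckets.setdefault(str(d.get(by)), []).append(d)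
    let buckets : PySem.Dict String (List (List (String × String))) :=
      data.foldl (fun b d => let k := pvKey by_ d; b.insert k (b.getD k [] ++ [d])) PySem.Dict.empty
    -- for i in orders: consume next bucket entry if any
    let st := orders.foldl
      (fun (st : List (List (String × String)) × PySem.Dict String Nat) i =>
        match buckets.get? i with
        | none => st
        | some q =>
          let p := st.2.getD i 0
          if hp : p < q.length then (st.1 ++ [q[p]], st.2.insert i (p + 1)) else st)
      ([], PySem.Dict.empty)
    if join_rest then
      -- append every dict whose bucket position was not consumed, in original order
      (data.foldl
        (fun (st : List (List (String × String)) × PySem.Dict String Nat) d =>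
          let k := pvKey by_ d
          let n := st.2.getD k 0
          if n ≠ 0 then (st.1, st.2.insert k (n - 1)) else (st.1 ++ [d], st.2))
        (st.1, st.2)).1
    else st.1

-- ===== PRECONDITION & SPEC =====
def Spec_order_list (data : List (List (String × String))) (orders : List String) (by_ : String) (join_rest : Bool) (out : List (List (String × String))) : Prop := out = order_list_alt data orders by_ join_rest
instance (data : List (List (String × String))) (orders : List String) (by_ : String) (join_rest : Bool) (out : List (List (String × String))) : Decidable (Spec_order_list data orders by_ join_rest out) := by unfold Spec_order_list; infer_instance

-- ===== CLAIM (what is proved, stated in full; the proofs are below) =====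
def Claim_equal_order_list : Prop := ∀ (data : List (List (String × String))) (orders : List String) (by_ : String) (join_rest : Bool), Dom_order_list data orders by_ join_rest → Spec_order_list data orders by_ join_rest (order_list data orders by_ join_rest)

-- ===== LEMMAS AND PROOFS =====

-- ghost state: how many elements with each key have been consumed so far
def pvInc (c : String → Nat) (k : String) : String → Nat := fun k' => if k' = k then c k' + 1 else c k'
def pvDec (c : String → Nat) (k : String) : String → Nat := fun k' => if k' = k then c k' - 1 else c k'

-- data with, per key k, its first (c k) elements dropped
def pvFilt (by_ : String) : List (List (String × String)) → (String → Nat) → List (List (String × String))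
  | [], _ => []
  | d :: rest, c =>
    if c (pvKey by_ d) = 0 then d :: pvFilt by_ rest c
    else pvFilt by_ rest (pvDec c (pvKey by_ d))

-- the n-th (0-based) element of data whose key is i
def pvKth (by_ i : String) : List (List (String × String)) → Nat → Option (List (String × String))
  | [], _ => none
  | d :: rest, n =>
    if pvKey by_ d = i then
      match n with
      | 0 => some d
      | Nat.succ m => pvKth by_ i rest m
    else pvKth by_ i rest n

-- reference loop both programs compute: per order entry, take the next unconsumed element of its key
def pvSpecLoop (by_ : String) (data : List (List (String × String))) : List String → (String → Nat) → List (List (String × String)) × (String → Nat)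
  | [], c => ([], c)
  | i :: os, c =>
    match pvKth by_ i data (c i) with
    | some d => let r := pvSpecLoop by_ data os (pvInc c i); (d :: r.1, r.2)
    | none => pvSpecLoop by_ data os c

theorem pvFilt_zero (by_ : String) (data : List (List (String × String))) : pvFilt by_ data (fun _ => 0) = data := by
  induction data with
  | nil => rfl
  | cons d rest ih => simp [pvFilt, ih]

theorem pvKth_key (by_ i : String) (data : List (List (String × String))) (n : Nat) (d : List (String × String)) (h : pvKth by_ i data n = some d) : pvKey by_ d = i := by
  induction data generalizing n with
  | nil => simp [pvKth] at h
  | cons d0 rest ih =>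
    simp only [pvKth] at h
    split at h
    · match n, h with
      | 0, h => cases h; assumption
      | Nat.succ m, h => exact ih m h
    · exact ih n h

theorem pvScan_filt (by_ i : String) (data : List (List (String × String))) (c : String → Nat) : aScan by_ i (pvFilt by_ data c) = pvKth by_ i data (c i) := by
  induction data generalizing c with
  | nil => rfl
  | cons d0 rest ih =>
    simp only [pvFilt, pvKth]
    by_cases h0 : c (pvKey by_ d0) = 0
    · rw [if_pos h0]
      by_cases hk : pvKey by_ d0 = i
      · rw [if_pos hk]
        have hci : c i = 0 := hk ▸ h0
        rw [hci]
        simp [aScan, hk]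
      · rw [if_neg hk]
        simp only [aScan, beq_iff_eq, if_neg hk]
        exact ih c
    · rw [if_neg h0, ih]
      by_cases hk : pvKey by_ d0 = i
      · rw [if_pos hk]
        subst hk
        have hd : pvDec c (pvKey by_ d0) (pvKey by_ d0) = c (pvKey by_ d0) - 1 := by simp [pvDec]
        rw [hd]
        obtain ⟨m, hm⟩ : ∃ m, c (pvKey by_ d0) = m + 1 := ⟨c (pvKey by_ d0) - 1, by omega⟩
        rw [hm]
        simp
      · rw [if_neg hk]
        have hd : pvDec c (pvKey by_ d0) i = c i := by simp [pvDec, Ne.symm hk]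
        rw [hd]

theorem pvRemove_filt (by_ i : String) (data : List (List (String × String))) (c : String → Nat) (d : List (String × String)) (h : pvKth by_ i data (c i) = some d) : PySem.List.remove? (pvFilt by_ data c) d = some (pvFilt by_ data (pvInc c i)) := by
  induction data generalizing c with
  | nil => simp [pvKth] at h
  | cons d0 rest ih =>
    simp only [pvKth] at h
    simp only [pvFilt]
    by_cases h0 : c (pvKey by_ d0) = 0
    · rw [if_pos h0]
      by_cases hk : pvKey by_ d0 = i
      · subst hk
        rw [if_pos rfl, h0] at h
        have hd0 : d0 = d := by simpa using h
        subst hd0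
        rw [PySem.List.remove?_cons_self]
        have h1 : pvInc c (pvKey by_ d0) (pvKey by_ d0) = 1 := by simp [pvInc, h0]
        rw [h1, if_neg one_ne_zero]
        have hfun : pvDec (pvInc c (pvKey by_ d0)) (pvKey by_ d0) = c := by
          funext k'
          simp only [pvDec, pvInc]
          by_cases e1 : k' = pvKey by_ d0 <;> simp [e1]
        rw [hfun]
      · rw [if_neg hk] at h
        have hkey := pvKth_key by_ i rest (c i) d h
        have hne : d0 ≠ d := fun he => hk (he ▸ hkey)
        rw [PySem.List.remove?_cons_of_ne _ hne, ih c h]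
        have h1 : pvInc c i (pvKey by_ d0) = 0 := by simp [pvInc, hk, h0]
        rw [h1, if_pos rfl]
        simp
    · rw [if_neg h0]
      have hstep : pvKth by_ i rest ((pvDec c (pvKey by_ d0)) i) = some d := by
        by_cases hk : pvKey by_ d0 = i
        · subst hk
          rw [if_pos rfl] at h
          have hd : pvDec c (pvKey by_ d0) (pvKey by_ d0) = c (pvKey by_ d0) - 1 := by simp [pvDec]
          rw [hd]
          obtain ⟨m, hm⟩ : ∃ m, c (pvKey by_ d0) = m + 1 := ⟨c (pvKey by_ d0) - 1, by omega⟩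
          rw [hm] at h ⊢
          simpa using h
        · rw [if_neg hk] at h
          have hd : pvDec c (pvKey by_ d0) i = c i := by simp [pvDec, Ne.symm hk]
          rw [hd]; exact h
      rw [ih _ hstep]
      have hne0 : pvInc c i (pvKey by_ d0) ≠ 0 := by
        simp only [pvInc]
        split <;> omega
      rw [if_neg hne0]
      have hfun : pvInc (pvDec c (pvKey by_ d0)) i = pvDec (pvInc c i) (pvKey by_ d0) := by
        funext k'
        by_cases hki : pvKey by_ d0 = i
        · subst hki
          simp only [pvInc, pvDec]
          by_cases e1 : k' = pvKey by_ d0 <;> simp [e1] <;> omega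
        · simp only [pvInc, pvDec]
          by_cases e1 : k' = pvKey by_ d0 <;> by_cases e2 : k' = i
          · exact absurd (e1.symm.trans e2) hki
          · simp [e1, hki]
          · simp [e2, Ne.symm hki]
          · simp [e1, e2]
      rw [hfun]

-- A's main loop computes pvSpecLoop
theorem pvA_loop (by_ : String) (data : List (List (String × String))) (os : List String) (res : List (List (String × String))) (c : String → Nat) :
    os.foldl
      (fun (st : List (List (String × String)) × List (List (String × String))) i =>
        match aScan by_ i st.2 with
        | some d => (st.1 ++ [d], (PySem.List.remove? st.2 d).getD st.2)
        | none => st)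
      (res, pvFilt by_ data c)
    = (res ++ (pvSpecLoop by_ data os c).1, pvFilt by_ data (pvSpecLoop by_ data os c).2) := by
  induction os generalizing res c with
  | nil => simp [pvSpecLoop]
  | cons i os ih =>
    simp only [List.foldl_cons, pvSpecLoop]
    rw [pvScan_filt]
    cases hk : pvKth by_ i data (c i) with
    | none => simpa using ih res c
    | some d =>
      simp only
      rw [pvRemove_filt by_ i data c d hk]
      simpa using ih (res ++ [d]) (pvInc c i)

-- the buckets dict: per key, the data elements with that key, in order
theorem pvBuckets_getD (by_ : String) (data : List (List (String × String))) (b : PySem.Dict String (List (List (String × String)))) (k : String) :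
    (data.foldl (fun b d => b.insert (pvKey by_ d) (b.getD (pvKey by_ d) [] ++ [d])) b).getD k []
    = b.getD k [] ++ data.filter (fun d => pvKey by_ d = k) := by
  induction data generalizing b with
  | nil => simp
  | cons d0 rest ih =>
    simp only [List.foldl_cons, List.filter_cons]
    rw [ih]
    rw [PySem.Dict.getD_insert]
    by_cases hk : k = pvKey by_ d0
    · simp [hk, List.append_assoc]
    · simp [hk, Ne.symm hk]

theorem pvKth_filter (by_ i : String) (data : List (List (String × String))) (n : Nat) : pvKth by_ i data n = (data.filter (fun d => pvKey by_ d = i))[n]? := by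
  induction data generalizing n with
  | nil => simp [pvKth]
  | cons d0 rest ih =>
    simp only [pvKth, List.filter_cons]
    by_cases hk : pvKey by_ d0 = i
    · simp only [hk]
      match n with
      | 0 => simp
      | Nat.succ m => simpa using ih m
    · simp [hk, ih n]

-- B's main loop computes pvSpecLoop (result) with the pos dict tracking the ghost counters
theorem pvB_loop (by_ : String) (data : List (List (String × String))) (os : List String) (res : List (List (String × String))) (pos : PySem.Dict String Nat) (c : String → Nat) (hc : ∀ k, pos.getD k 0 = c k) :
    let buckets := data.foldl (fun b d => b.insert (pvKey by_ d) (b.getD (pvKey by_ d) [] ++ [d])) (PySem.Dict.empty : PySem.Dict String (List (List (String × String))))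
    let st := os.foldl
      (fun (st : List (List (String × String)) × PySem.Dict String Nat) i =>
        match buckets.get? i with
        | none => st
        | some q =>
          let p := st.2.getD i 0
          if hp : p < q.length then (st.1 ++ [q[p]], st.2.insert i (p + 1)) else st)
      (res, pos)
    st.1 = res ++ (pvSpecLoop by_ data os c).1 ∧ ∀ k, st.2.getD k 0 = (pvSpecLoop by_ data os c).2 k := by
  intro buckets
  induction os generalizing res pos c with
  | nil => exact ⟨by simp [pvSpecLoop], by simpa [pvSpecLoop] using hc⟩
  | cons i os ih =>
    simp only [List.foldl_cons, pvSpecLoop]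
    have hbq : buckets.getD i [] = data.filter (fun d => pvKey by_ d = i) := by
      simpa using pvBuckets_getD by_ data PySem.Dict.empty i
    have hkth : pvKth by_ i data (c i) = (buckets.getD i [])[c i]? := by
      rw [hbq]; exact pvKth_filter by_ i data (c i)
    cases hg : buckets.get? i with
    | none =>
      have hq : buckets.getD i [] = [] := by
        rw [PySem.Dict.getD_eq_get?_getD, hg]; rfl
      have : pvKth by_ i data (c i) = none := by
        rw [hkth, hq]; simp
      rw [this]
      exact ih res pos c hc
    | some q =>
      have hq : buckets.getD i [] = q := by
        rw [PySem.Dict.getD_eq_get?_getD, hg]; rfl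
      simp only [hc i]
      by_cases hp : c i < q.length
      · simp only [dif_pos hp]
        have : pvKth by_ i data (c i) = some q[c i] := by
          rw [hkth, hq]; simp [hp]
        rw [this]
        have hc' : ∀ k, (pos.insert i (c i + 1)).getD k 0 = pvInc c i k := by
          intro k
          rw [PySem.Dict.getD_insert]
          simp only [pvInc]
          by_cases hk : k = i <;> simp [hk, hc k]
        simpa using ih (res ++ [q[c i]]) (pos.insert i (c i + 1)) (pvInc c i) hc'
      · simp only [dif_neg hp]
        have : pvKth by_ i data (c i) = none := by
          rw [hkth, hq]
          exact List.getElem?_eq_none (by omega)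
        rw [this]
        exact ih res pos c hc

-- B's rest loop computes pvFilt
theorem pvB_rest (by_ : String) (data : List (List (String × String))) (res : List (List (String × String))) (skip : PySem.Dict String Nat) (c : String → Nat) (hc : ∀ k, skip.getD k 0 = c k) :
    (data.foldl
      (fun (st : List (List (String × String)) × PySem.Dict String Nat) d =>
        let k := pvKey by_ d
        let n := st.2.getD k 0
        if n ≠ 0 then (st.1, st.2.insert k (n - 1)) else (st.1 ++ [d], st.2))
      (res, skip)).1
    = res ++ pvFilt by_ data c := by
  induction data generalizing res skip c with
  | nil => simp [pvFilt]
  | cons d0 rest ih =>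
    simp only [List.foldl_cons, pvFilt, hc]
    by_cases h0 : c (pvKey by_ d0) = 0
    · rw [if_neg (not_not_intro h0), if_pos h0]
      rw [ih (res ++ [d0]) skip c hc]
      simp
    · rw [if_pos h0, if_neg h0]
      have hc' : ∀ k, (skip.insert (pvKey by_ d0) (c (pvKey by_ d0) - 1)).getD k 0 = pvDec c (pvKey by_ d0) k := by
        intro k
        rw [PySem.Dict.getD_insert]
        simp only [pvDec]
        by_cases hk : k = pvKey by_ d0 <;> simp [hk, hc k]
      exact ih res _ _ hc'

-- ===== VERDICT (by name: the statement is the Claim_ definition above) =====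
theorem order_list_spec : Claim_equal_order_list := by
  intro data orders by_ join_rest _
  unfold Spec_order_list order_list order_list_alt
  by_cases hg : data.length ≤ 1 ∨ orders = []
  · simp only [if_pos hg]
  · simp only [if_neg hg]
    have hA := pvA_loop by_ data orders [] (fun _ => 0)
    rw [pvFilt_zero] at hA
    have hB := pvB_loop by_ data orders [] PySem.Dict.empty (fun _ => 0) (fun k => rfl)
    simp only at hB
    obtain ⟨hB1, hB2⟩ := hB
    rw [hA]
    cases join_rest with
    | false =>
      simp only [Bool.false_eq_true, if_false]
      rw [hB1]
    | true =>
      simp only [if_true]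
      rw [pvB_rest by_ data _ _ (pvSpecLoop by_ data orders (fun _ => 0)).2 hB2]
      rw [hB1]
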